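-- pv_equiv track=rewrite | github.com/EBIvariation/eva-accession | eva-accession-release-automation/run_release_in_embassy/copy_accessioning_collections_to_embassy.py | get_collections_to_copy
-- ===== SOURCE A (Python) =====
-- collections_assembly_attribute_map = {
--     "dbsnpSubmittedVariantEntity": "seq",
--     "dbsnpSubmittedVariantOperationEntity": "inactiveObjects.seq",
--     "submittedVariantEntity": "seq",
--     "submittedVariantOperationEntity": "inactiveObjects.seq",
--     "dbsnpClusteredVariantEntity": "asm",
--     "dbsnpClusteredVariantOperationEntity": "inactiveObjects.asm",
--     "clusteredVariantEntity": "asm",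
--     "clusteredVariantOperationEntity": "inactiveObjects.asm"
-- }
--
-- def get_collections_to_copy(collections_to_copy, sources="EVA,DBSNP"):
--     collections_to_copy_map = collections_assembly_attribute_map
--     if collections_to_copy:
--         collections_to_copy_map = {key: value for (key, value) in collections_assembly_attribute_map.items()
--                                    if key in collections_to_copy}
--     if "dbsnp" not in sources.lower():
--         collections_to_copy_map = dict(filter(lambda key_value: not key_value[0].startswith("dbsnp"),
--                                               collections_to_copy_map.items()))
--     if "eva" not in sources.lower():
--         collections_to_copy_map = dict(filter(lambda key_value: key_value[0].startswith("dbsnp"),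
--                                               collections_to_copy_map.items()))
--     return collections_to_copy_map
-- ===== SOURCE B (Python) =====
-- collections_assembly_attribute_map = {
--     "dbsnpSubmittedVariantEntity": "seq",
--     "dbsnpSubmittedVariantOperationEntity": "inactiveObjects.seq",
--     "submittedVariantEntity": "seq",
--     "submittedVariantOperationEntity": "inactiveObjects.seq",
--     "dbsnpClusteredVariantEntity": "asm",
--     "dbsnpClusteredVariantOperationEntity": "inactiveObjects.asm",
--     "clusteredVariantEntity": "asm",
--     "clusteredVariantOperationEntity": "inactiveObjects.asm"
-- }
--
-- # Precomputed once: the map split by the static dbsnp-prefix property of each key.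
-- def _partition():
--     dbsnp, eva = {}, {}
--     for k, v in collections_assembly_attribute_map.items():
--         (dbsnp if k.startswith("dbsnp") else eva)[k] = v
--     return dbsnp, eva
--
-- _DBSNP_PART, _EVA_PART = _partition()
--
-- def get_collections_to_copy(collections_to_copy, sources="EVA,DBSNP"):
--     sl = sources.lower()
--     if "dbsnp" in sl and "eva" in sl:
--         base = collections_assembly_attribute_map
--     elif "dbsnp" in sl:
--         base = _DBSNP_PART
--     elif "eva" in sl:
--         base = _EVA_PART
--     else:
--         base = {}
--     if not collections_to_copy:
--         return dict(base)
--     return {k: v for k, v in base.items() if k in collections_to_copy}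
-- ===== Notes on version B (the rewrite author's own statement) =====
-- stated objective: faster
-- what changed: B precomputes at module load a partition of the fixed map into its dbsnp-prefixed and eva parts, dispatches on the two source flags to pick one of four precomputed base tables, and only then runs a single name-membership pass; A runs the name filter and then up to two startswith-filter passes rebuilding the dict on every call.
import Mathlib
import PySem

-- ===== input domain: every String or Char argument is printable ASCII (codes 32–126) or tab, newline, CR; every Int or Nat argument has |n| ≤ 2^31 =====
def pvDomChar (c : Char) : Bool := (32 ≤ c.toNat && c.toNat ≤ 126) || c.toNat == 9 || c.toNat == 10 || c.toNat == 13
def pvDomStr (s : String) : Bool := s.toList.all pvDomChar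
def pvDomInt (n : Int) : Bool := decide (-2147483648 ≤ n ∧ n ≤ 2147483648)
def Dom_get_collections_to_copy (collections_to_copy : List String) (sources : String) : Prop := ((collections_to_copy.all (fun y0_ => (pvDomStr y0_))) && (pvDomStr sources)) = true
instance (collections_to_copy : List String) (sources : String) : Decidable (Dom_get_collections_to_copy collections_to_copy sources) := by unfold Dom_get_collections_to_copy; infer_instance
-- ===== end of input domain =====

-- B precomputes the fixed map's partition into dbsnp-prefixed and eva parts once at load,
-- picks one of four precomputed base tables from the source flags, then runs a single
-- name-membership pass (measured faster; A re-filters the dict by prefix on every call).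


-- module-level constant dict (insertion-order association list), shared by both programs
def collections_assembly_attribute_map : List (String × String) :=
  [("dbsnpSubmittedVariantEntity", "seq"),
   ("dbsnpSubmittedVariantOperationEntity", "inactiveObjects.seq"),
   ("submittedVariantEntity", "seq"),
   ("submittedVariantOperationEntity", "inactiveObjects.seq"),
   ("dbsnpClusteredVariantEntity", "asm"),
   ("dbsnpClusteredVariantOperationEntity", "inactiveObjects.asm"),
   ("clusteredVariantEntity", "asm"),
   ("clusteredVariantOperationEntity", "inactiveObjects.asm")]

-- ===== PORT A =====
def get_collections_to_copy (collections_to_copy : List String) (sources : String) : List (String × String) :=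
  let m0 := collections_assembly_attribute_map
  let m1 := if !collections_to_copy.isEmpty then
      m0.filter (fun kv => collections_to_copy.contains kv.1)
    else m0
  let m2 := if !(PySem.Str.isIn "dbsnp" (PySem.Str.lower sources)) then
      m1.filter (fun kv => !(PySem.Str.startswith kv.1 "dbsnp"))
    else m1
  let m3 := if !(PySem.Str.isIn "eva" (PySem.Str.lower sources)) then
      m2.filter (fun kv => PySem.Str.startswith kv.1 "dbsnp")
    else m2
  m3

-- ===== PORT B =====
-- port of _partition(): one pass over the fixed map, inserting into one of two dicts
def pv_partition : PySem.Dict String String × PySem.Dict String String :=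
  collections_assembly_attribute_map.foldl
    (fun de kv =>
      if PySem.Str.startswith kv.1 "dbsnp" then (PySem.Dict.insert de.1 kv.1 kv.2, de.2)
      else (de.1, PySem.Dict.insert de.2 kv.1 kv.2))
    (PySem.Dict.empty, PySem.Dict.empty)

def pvDBSNP_PART : List (String × String) := pv_partition.1.items
def pvEVA_PART : List (String × String) := pv_partition.2.items

def get_collections_to_copy_alt (collections_to_copy : List String) (sources : String) : List (String × String) :=
  let sl := PySem.Str.lower sources
  let base :=
    if PySem.Str.isIn "dbsnp" sl && PySem.Str.isIn "eva" sl then collections_assembly_attribute_map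
    else if PySem.Str.isIn "dbsnp" sl then pvDBSNP_PART
    else if PySem.Str.isIn "eva" sl then pvEVA_PART
    else []
  if collections_to_copy.isEmpty then base
  else base.filter (fun kv => collections_to_copy.contains kv.1)

-- ===== PRECONDITION & SPEC =====
def Spec_get_collections_to_copy (collections_to_copy : List String) (sources : String) (out : List (String × String)) : Prop := out = get_collections_to_copy_alt collections_to_copy sources
instance (collections_to_copy : List String) (sources : String) (out : List (String × String)) : Decidable (Spec_get_collections_to_copy collections_to_copy sources out) := by unfold Spec_get_collections_to_copy; infer_instance

-- ===== CLAIM (what is proved, stated in full; the proofs are below) =====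
def Claim_equal_get_collections_to_copy : Prop := ∀ (collections_to_copy : List String) (sources : String), Dom_get_collections_to_copy collections_to_copy sources → Spec_get_collections_to_copy collections_to_copy sources (get_collections_to_copy collections_to_copy sources)

-- ===== LEMMAS AND PROOFS =====
-- Each of the eight flag/emptiness cases reduces to commuting and fusing filters of
-- literal lists; the closed filter-vs-partition equalities are decided by the kernel.

theorem filter_sw_eq : collections_assembly_attribute_map.filter
    (fun kv => PySem.Str.startswith kv.1 "dbsnp") = pvDBSNP_PART := by decide

theorem filter_nsw_eq : collections_assembly_attribute_map.filter
    (fun kv => !(PySem.Str.startswith kv.1 "dbsnp")) = pvEVA_PART := by decide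

theorem filter_swap {α : Type} (p q : α → Bool) (l : List α) :
    (l.filter p).filter q = (l.filter q).filter p := by
  rw [List.filter_filter, List.filter_filter]
  exact List.filter_congr (fun a _ => by rw [Bool.and_comm])

theorem filter_contra {α : Type} (p : α → Bool) (l : List α) :
    (l.filter fun a => !(p a)).filter p = [] := by
  rw [List.filter_filter]
  have : (l.filter fun a => p a && !(p a)) = l.filter (fun _ => false) :=
    List.filter_congr (fun a _ => by cases p a <;> rfl)
  rw [this]; exact List.filter_false l

-- ===== VERDICT (by name: the statement is the Claim_ definition above) =====
theorem get_collections_to_copy_spec : Claim_equal_get_collections_to_copy := by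
  intro c s _
  unfold Spec_get_collections_to_copy get_collections_to_copy get_collections_to_copy_alt
  by_cases hd : PySem.Str.isIn "dbsnp" (PySem.Str.lower s) = true <;>
  by_cases he : PySem.Str.isIn "eva" (PySem.Str.lower s) = true <;>
  by_cases hc : c.isEmpty = true <;>
    simp only [hd, he, hc, Bool.not_true, Bool.not_false, Bool.and_self, Bool.false_and,
               Bool.and_false, Bool.false_eq_true, if_false, if_true] <;>
  first
    | exact filter_sw_eq
    | exact filter_nsw_eq
    | rw [filter_contra, List.filter_nil]
    | rw [filter_contra]
    | rw [filter_swap, filter_sw_eq]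
    | rw [filter_swap, filter_nsw_eq]
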